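-- pv_equiv track=rewrite | github.com/pasqal-io/Pasqal_Hackathon_Feb25_Team_03 | TSP_Formulation_Methods.py | check_constraint_3
-- ===== SOURCE A (Python) =====
-- def check_constraint_3(solution_array, N, p):
--     for k in range(N):
--         sum = 0
--         for f in range(k, N*(p+1), N):
--             sum += solution_array[f]
--         if sum > 1:
--             return False
--     return True
-- ===== SOURCE B (Python) =====
-- def check_constraint_3(solution_array, N, p):
--     # One flat pass maintaining N residue-class accumulators instead of N strided inner loops.
--     if N <= 0:
--         return True
--     sums = [0] * N
--     for f in range(N * (p + 1)):
--         sums[f % N] += solution_array[f]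
--     return all(s <= 1 for s in sums)
-- ===== Notes on version B (the rewrite author's own statement) =====
-- stated objective: alternative
-- what changed: Replaces N separate strided inner loops (one per residue class, with early exit) by a single flat pass over range(N*(p+1)) that maintains N accumulators indexed by f % N, followed by an all() over the accumulators.
-- outside the precondition, e.g. on check_constraint_3([2], 2, 0): A returns False, B raises IndexError
import Mathlib
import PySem

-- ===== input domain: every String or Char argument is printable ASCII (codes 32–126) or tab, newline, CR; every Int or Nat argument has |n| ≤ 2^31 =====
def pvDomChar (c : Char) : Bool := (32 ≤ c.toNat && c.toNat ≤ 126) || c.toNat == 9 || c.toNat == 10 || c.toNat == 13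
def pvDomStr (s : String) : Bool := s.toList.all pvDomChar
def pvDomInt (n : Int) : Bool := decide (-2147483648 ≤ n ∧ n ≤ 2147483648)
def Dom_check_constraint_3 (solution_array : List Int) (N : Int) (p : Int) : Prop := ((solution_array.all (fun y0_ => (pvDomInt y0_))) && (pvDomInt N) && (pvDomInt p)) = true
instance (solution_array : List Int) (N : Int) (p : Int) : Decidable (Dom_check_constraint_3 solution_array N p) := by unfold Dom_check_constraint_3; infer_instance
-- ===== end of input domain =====

-- B replaces A's N strided per-residue-class loops by one flat pass over range(N*(p+1))
-- maintaining N accumulators indexed by f % N (alternative decomposition, same cost).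

-- ===== PORT A =====
def check_constraint_3 (solution_array : List Int) (N : Int) (p : Int) : Bool :=
  -- for k in range(N): sum over f in range(k, N*(p+1), N); early False is the same as .all
  (PySem.List.pyRange 0 N 1).all (fun k =>
    decide (((PySem.List.pyRange k (N * (p + 1)) N).foldl
      (fun s f => s + (PySem.List.pyGet? solution_array f).getD 0) 0) ≤ 1))

-- ===== PORT B =====
def check_constraint_3_alt (solution_array : List Int) (N : Int) (p : Int) : Bool :=
  if N ≤ 0 then true
  else
    -- sums = [0]*N; for f in range(N*(p+1)): sums[f % N] += solution_array[f]
    let sums := (PySem.List.pyRange 0 (N * (p + 1)) 1).foldl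
      (fun (acc : List Int) f =>
        acc.modify (PySem.Int.mod f N).toNat
          (fun s => s + (PySem.List.pyGet? solution_array f).getD 0))
      (List.replicate N.toNat 0)
    sums.all (fun s => decide (s ≤ 1))

-- ===== PRECONDITION & SPEC =====
-- Pre_ excludes inputs where a program raises IndexError: with N > 0 and the array shorter
-- than N*(p+1), B always raises, and A raises too unless its early exit in residue class 0
-- returns False before reaching the first missing index (see the cite in claim.json).
def Pre_check_constraint_3 (solution_array : List Int) (N : Int) (p : Int) : Prop :=
  N ≤ 0 ∨ N * (p + 1) ≤ (solution_array.length : Int)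
instance (solution_array : List Int) (N : Int) (p : Int) : Decidable (Pre_check_constraint_3 solution_array N p) := by unfold Pre_check_constraint_3; infer_instance

def pvWitness_check_constraint_3 : List Int × Int × Int := ([0, 1, 1, 0], 2, 1)

def Spec_check_constraint_3 (solution_array : List Int) (N : Int) (p : Int) (out : Bool) : Prop := out = check_constraint_3_alt solution_array N p
instance (solution_array : List Int) (N : Int) (p : Int) (out : Bool) : Decidable (Spec_check_constraint_3 solution_array N p out) := by unfold Spec_check_constraint_3; infer_instance

-- ===== CLAIM (what is proved, stated in full; the proofs are below) =====
def Claim_equal_check_constraint_3 : Prop := ∀ (solution_array : List Int) (N : Int) (p : Int), Dom_check_constraint_3 solution_array N p → Pre_check_constraint_3 solution_array N p → Spec_check_constraint_3 solution_array N p (check_constraint_3 solution_array N p)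

-- ===== LEMMAS AND PROOFS =====

-- xs[f] with the getD-0 totalisation both ports use
def pvG (xs : List Int) (f : Int) : Int := (PySem.List.pyGet? xs f).getD 0

-- B's loop body
def pvStep (xs : List Int) (n : Int) (acc : List Int) (f : Int) : List Int :=
  acc.modify (PySem.Int.mod f n).toNat (fun s => s + pvG xs f)

theorem pvStep_len (xs : List Int) (n : Int) (l : List Int) (init : List Int) :
    (l.foldl (pvStep xs n) init).length = init.length := by
  induction l generalizing init with
  | nil => rfl
  | cons a t ih => simp [List.foldl_cons, ih, pvStep, List.length_modify]

theorem pvRangeFilterEqNil (n k : Nat) (h : n ≤ k) :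
    (List.range n).filter (fun i => i == k) = [] := by
  induction n with
  | zero => rfl
  | succ m ih =>
    rw [List.range_succ, List.filter_append, ih (by omega)]
    simp
    omega

theorem pvRangeFilterEq (n k : Nat) (h : k < n) :
    (List.range n).filter (fun i => i == k) = [k] := by
  induction n with
  | zero => omega
  | succ m ih =>
    rw [List.range_succ, List.filter_append]
    by_cases hk : k < m
    · rw [ih hk]
      simp
      omega
    · have hk' : k = m := by omega
      subst hk'
      rw [pvRangeFilterEqNil k k le_rfl]
      simp

-- the residue-class-k elements of range(n*q) are exactly k, k+n, …, k+(q-1)n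
theorem pvFilterRange (n q k : Nat) (h : k < n) :
    (List.range (n * q)).filter (fun i => i % n == k)
      = (List.range q).map (fun j => k + n * j) := by
  induction q with
  | zero => simp
  | succ m ih =>
    have hmul : n * (m + 1) = n * m + n := by ring
    rw [hmul, List.range_add, List.filter_append, ih, List.filter_map]
    have hcg : (List.range n).filter ((fun i => i % n == k) ∘ (fun x => n * m + x))
        = (List.range n).filter (fun i => i == k) := by
      apply List.filter_congr
      intro x hx
      have hxn : x < n := List.mem_range.mp hx
      have hxmod : (n * m + x) % n = x := by
        rw [Nat.add_comm, Nat.mul_comm, Nat.add_mul_mod_self_right, Nat.mod_eq_of_lt hxn]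
      simp [Function.comp, hxmod]
    rw [hcg, pvRangeFilterEq n k h, List.range_succ, List.map_append]
    simp [Nat.add_comm]

-- B's accumulator after m steps: entry k holds the sum over residue class k of [0, m)
theorem pvFoldChar (xs : List Int) (n : Nat) (m k : Nat) (hk : k < n) :
    (((List.range m).map (fun i => Int.ofNat i)).foldl (pvStep xs (n : Int))
        (List.replicate n 0)).getD k 0
      = (((List.range m).filter (fun i => i % n == k)).map (fun i => pvG xs (Int.ofNat i))).sum := by
  induction m with
  | zero => simp [List.getD]
  | succ m ih =>
    rw [List.range_succ, List.map_append, List.foldl_append, List.filter_append,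
        List.map_append, List.sum_append]
    simp only [List.map_cons, List.map_nil, List.foldl_cons, List.foldl_nil]
    have hlen : (((List.range m).map (fun i => Int.ofNat i)).foldl (pvStep xs (n : Int))
        (List.replicate n 0)).length = n := by
      rw [pvStep_len]; simp
    set L := ((List.range m).map (fun i => Int.ofNat i)).foldl (pvStep xs (n : Int))
        (List.replicate n 0) with hL
    have hmod : (PySem.Int.mod (Int.ofNat m) (n : Int)).toNat = m % n := by
      rw [Int.ofNat_eq_natCast, PySem.Int.mod_natCast]
      omega
    have hgd : (pvStep xs (n : Int) L (Int.ofNat m)).getD k 0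
        = if m % n = k then L.getD k 0 + pvG xs (Int.ofNat m) else L.getD k 0 := by
      unfold pvStep
      rw [hmod]
      have h1 : (L.modify (m % n) (fun s => s + pvG xs (Int.ofNat m))).getD k 0
          = ((L.modify (m % n) (fun s => s + pvG xs (Int.ofNat m)))[k]?).getD 0 := by
        simp [List.getD]
      rw [h1, List.getElem?_modify]
      have hk' : k < L.length := by omega
      by_cases hc : m % n = k
      · simp [hc, List.getD_eq_getElem L 0 hk', List.getElem?_eq_getElem hk']
      · simp [hc, List.getD_eq_getElem L 0 hk', List.getElem?_eq_getElem hk']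
    rw [hgd, ih]
    by_cases hc : m % n = k
    · simp [hc]
    · have : (m % n == k) = false := by simp [hc]
      simp [this, hc]

-- A's inner strided range as a block count: range(k, N*(p+1), N) has (p+1)⁺ elements
theorem pvInnerRange (N p k : Int) (hN : 0 < N) (hk0 : 0 ≤ k) (hkN : k < N) :
    PySem.List.pyRange k (N * (p + 1)) N
      = (List.range (p + 1).toNat).map (fun j => k + N * Int.ofNat j) := by
  rw [PySem.List.pyRange_of_pos _ _ hN]
  have hcnt : (if k < N * (p + 1) then ((N * (p + 1) - k + N - 1) / N).toNat else 0)
      = (p + 1).toNat := by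
    by_cases hp : p + 1 ≤ 0
    · have h1 : ¬ k < N * (p + 1) := by nlinarith
      rw [if_neg h1]
      omega
    · push_neg at hp
      have h1 : k < N * (p + 1) := by nlinarith
      rw [if_pos h1]
      have hsplit : N * (p + 1) - k + N - 1 = (N - 1 - k) + (p + 1) * N := by ring
      have hdiv : (N * (p + 1) - k + N - 1) / N = p + 1 := by
        rw [hsplit, Int.add_mul_ediv_right _ _ (by omega : N ≠ 0),
            Int.ediv_eq_zero_of_lt (by omega) (by omega)]
        omega
      rw [hdiv]
  rw [hcnt]
  simp [Int.ofNat_eq_natCast]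

-- ===== VERDICT (by name: the statement is the Claim_ definition above) =====
-- assembling the two characterisations
theorem check_constraint_3_spec : Claim_equal_check_constraint_3 := by
  intro xs N p _hDom _hPre
  unfold Spec_check_constraint_3
  by_cases hN : N ≤ 0
  · simp [check_constraint_3, check_constraint_3_alt, hN, PySem.List.pyRange_one_eq_nil hN]
  · push_neg at hN
    have hNn : ((N.toNat : Int)) = N := Int.toNat_of_nonneg hN.le
    have hn0 : 0 < N.toNat := by omega
    have hM : (N * (p + 1) - 0).toNat = N.toNat * (p + 1).toNat := by
      by_cases hp : 0 ≤ p + 1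
      · have : N * (p + 1) = ((N.toNat * (p + 1).toNat : Nat) : Int) := by
          push_cast [hNn, Int.toNat_of_nonneg hp]; ring
        rw [sub_zero, this, Int.toNat_natCast]
      · push_neg at hp
        have h1 : N * (p + 1) ≤ 0 := by nlinarith
        have h2 : (p + 1).toNat = 0 := by omega
        rw [h2]
        omega
    -- characterise B's accumulator list
    have hBfold : (PySem.List.pyRange 0 (N * (p + 1)) 1).foldl
        (fun (acc : List Int) f =>
          acc.modify (PySem.Int.mod f N).toNat
            (fun s => s + (PySem.List.pyGet? xs f).getD 0))
        (List.replicate N.toNat 0)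
        = ((List.range (N.toNat * (p + 1).toNat)).map (fun i => Int.ofNat i)).foldl
            (pvStep xs (N.toNat : Int)) (List.replicate N.toNat 0) := by
      rw [PySem.List.pyRange_one, hM, hNn]
      simp only [zero_add, Int.ofNat_eq_natCast]
      rfl
    rw [Bool.eq_iff_iff]
    unfold check_constraint_3 check_constraint_3_alt
    rw [if_neg (by omega)]
    simp only [hBfold, List.all_eq_true, decide_eq_true_eq]
    have hlen : (((List.range (N.toNat * (p + 1).toNat)).map (fun i => Int.ofNat i)).foldl
        (pvStep xs (N.toNat : Int)) (List.replicate N.toNat 0)).length = N.toNat := by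
      rw [pvStep_len]; simp
    set L := ((List.range (N.toNat * (p + 1).toNat)).map (fun i => Int.ofNat i)).foldl
        (pvStep xs (N.toNat : Int)) (List.replicate N.toNat 0) with hLdef
    -- A's inner sum at class x equals B's accumulator entry x.toNat
    have hkey : ∀ x : Int, 0 ≤ x → x < N →
        ((PySem.List.pyRange x (N * (p + 1)) N).foldl
          (fun s f => s + (PySem.List.pyGet? xs f).getD 0) 0) = L.getD x.toNat 0 := by
      intro x hx0 hxN
      have hxn : x.toNat < N.toNat := by omega
      rw [hLdef, pvFoldChar xs N.toNat _ _ hxn,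
          pvFilterRange N.toNat (p + 1).toNat x.toNat hxn,
          pvInnerRange N p x hN hx0 hxN,
          PySem.List.foldl_add, zero_add, List.map_map, List.map_map]
      apply congrArg List.sum
      apply List.map_congr_left
      intro j _
      simp only [Function.comp, pvG, Int.ofNat_eq_natCast]
      congr 2
      push_cast [Int.toNat_of_nonneg hx0, hNn]
      ring
    constructor
    · intro hA s hs
      obtain ⟨k, hk, rfl⟩ := List.mem_iff_getElem.mp hs
      have hkn : k < N.toNat := by omega
      have hx : (k : Int) ∈ PySem.List.pyRange 0 N 1 := by
        rw [PySem.List.mem_pyRange_one]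
        omega
      have := hA _ hx
      rw [hkey (k : Int) (by omega) (by omega)] at this
      simp only [Int.toNat_natCast] at this
      rwa [List.getD_eq_getElem L 0 hk] at this
    · intro hB x hx
      rw [PySem.List.mem_pyRange_one] at hx
      rw [hkey x hx.1 hx.2]
      have hkn : x.toNat < L.length := by omega
      rw [List.getD_eq_getElem L 0 hkn]
      exact hB _ (List.getElem_mem hkn)
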